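-- pv_equiv track=rewrite | github.com/ben-hutchinson/pokeleximon | services/crossword-gen/scripts/generate_connected_templates.py | _line_has_short_run
-- ===== SOURCE A (Python) =====
-- def _line_has_short_run(line: list[bool], min_len: int = 4) -> bool:
--     run = 0
--     for blocked in line:
--         if blocked:
--             if 0 < run < min_len:
--                 return True
--             run = 0
--         else:
--             run += 1
--     if 0 < run < min_len:
--         return True
--     return False
-- ===== SOURCE B (Python) =====
-- def _line_has_short_run(line: list[bool], min_len: int = 4) -> bool:
--     bounds = [-1] + [i for i, b in enumerate(line) if b] + [len(line)]
--     return any(0 < hi - lo - 1 < min_len for lo, hi in zip(bounds, bounds[1:]))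
-- ===== Notes on version B (the rewrite author's own statement) =====
-- stated objective: alternative
-- what changed: Replaces the stateful run-counter scan with an index-then-arithmetic decomposition: collect blocked positions with sentinels and test each gap hi-lo-1 between consecutive blocked positions.
import Mathlib
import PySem

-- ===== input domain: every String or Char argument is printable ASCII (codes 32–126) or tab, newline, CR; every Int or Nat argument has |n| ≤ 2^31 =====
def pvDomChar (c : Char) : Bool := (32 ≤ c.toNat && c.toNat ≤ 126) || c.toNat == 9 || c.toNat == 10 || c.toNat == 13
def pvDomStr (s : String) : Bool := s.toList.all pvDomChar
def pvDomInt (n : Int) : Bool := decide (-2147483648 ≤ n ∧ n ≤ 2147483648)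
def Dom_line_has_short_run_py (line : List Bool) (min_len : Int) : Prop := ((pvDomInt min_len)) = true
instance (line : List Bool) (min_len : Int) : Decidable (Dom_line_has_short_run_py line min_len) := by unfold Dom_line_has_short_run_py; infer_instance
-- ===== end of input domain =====

-- B replaces A's stateful run counter with sentinel-padded blocked indices and gap arithmetic; same values everywhere (alternative decomposition).

-- ===== PORT A =====
-- the for-loop with early return, state `run`
def lhsrGo (line : List Bool) (run : Int) (min_len : Int) : Bool :=
  match line with
  | [] => decide (0 < run ∧ run < min_len)
  | blocked :: rest =>
      if blocked then
        if 0 < run ∧ run < min_len then true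
        else lhsrGo rest 0 min_len
      else lhsrGo rest (run + 1) min_len

def line_has_short_run_py (line : List Bool) (min_len : Int) : Bool :=
  lhsrGo line 0 min_len

-- ===== PORT B =====
-- bounds = [-1] + [i for i, b in enumerate(line) if b] + [len(line)]
-- any(0 < hi - lo - 1 < min_len for lo, hi in zip(bounds, bounds[1:]))
def line_has_short_run_py_alt (line : List Bool) (min_len : Int) : Bool :=
  let bounds : List Int :=
    [-1] ++ ((PySem.List.enumerate line).filterMap (fun p => if p.2 then some p.1 else none))
         ++ [(line.length : Int)]
  (bounds.zip (bounds.drop 1)).any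
    (fun p => decide (0 < p.2 - p.1 - 1 ∧ p.2 - p.1 - 1 < min_len))

-- ===== PRECONDITION & SPEC =====
def Spec_line_has_short_run_py (line : List Bool) (min_len : Int) (out : Bool) : Prop := out = line_has_short_run_py_alt line min_len
instance (line : List Bool) (min_len : Int) (out : Bool) : Decidable (Spec_line_has_short_run_py line min_len out) := by unfold Spec_line_has_short_run_py; infer_instance

-- ===== CLAIM (what is proved, stated in full; the proofs are below) =====
def Claim_equal_line_has_short_run_py : Prop := ∀ (line : List Bool) (min_len : Int), Dom_line_has_short_run_py line min_len → Spec_line_has_short_run_py line min_len (line_has_short_run_py line min_len)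

-- ===== LEMMAS AND PROOFS =====

-- blocked indices of `line` when its first element has index `s`
def lhsrBlk (s : Int) (line : List Bool) : List Int :=
  match line with
  | [] => []
  | true :: rest => s :: lhsrBlk (s + 1) rest
  | false :: rest => lhsrBlk (s + 1) rest

theorem lhsrBlk_eq_filterMap (line : List Bool) (s : Int) :
    (PySem.List.enumerate line s).filterMap (fun p => if p.2 then some p.1 else none)
      = lhsrBlk s line := by
  induction line generalizing s with
  | nil => simp [PySem.List.enumerate_nil, lhsrBlk]
  | cons b rest ih =>
      cases b <;> simp [PySem.List.enumerate_cons, lhsrBlk, ih]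

-- "any adjacent-pair gap" as a recursion, seeded with the previous bound `lo` and final sentinel `last`
def lhsrGaps (lo : Int) (xs : List Int) (last : Int) (m : Int) : Bool :=
  match xs with
  | [] => decide (0 < last - lo - 1 ∧ last - lo - 1 < m)
  | x :: rest => decide (0 < x - lo - 1 ∧ x - lo - 1 < m) || lhsrGaps x rest last m

theorem zip_any_eq_lhsrGaps (xs : List Int) (lo last m : Int) :
    (((lo :: xs ++ [last]).zip ((lo :: xs ++ [last]).drop 1)).any
      (fun p => decide (0 < p.2 - p.1 - 1 ∧ p.2 - p.1 - 1 < m))) = lhsrGaps lo xs last m := by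
  induction xs generalizing lo with
  | nil => simp [lhsrGaps]
  | cons x rest ih => simp [lhsrGaps, ← ih x]

theorem lhsrGaps_eq_go (line : List Bool) (s run m : Int) (h : 0 ≤ run) :
    lhsrGaps (s - run - 1) (lhsrBlk s line) (s + line.length) m = lhsrGo line run m := by
  induction line generalizing s run with
  | nil =>
      simp only [lhsrBlk, lhsrGaps, lhsrGo, List.length_nil]
      push_cast
      congr 1
      rw [eq_iff_iff]
      constructor <;> intro hc <;> exact ⟨by omega, by omega⟩
  | cons b rest ih =>
      cases b with
      | true =>
          simp only [lhsrBlk, lhsrGaps, lhsrGo, List.length_cons]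
          push_cast
          have hih := ih (s + 1) 0 le_rfl
          rw [show (s + 1) - 0 - 1 = s by ring] at hih
          rw [show s + (↑rest.length + 1) = (s + 1) + ↑rest.length by ring, hih]
          by_cases hc : 0 < run ∧ run < m
          · rw [decide_eq_true (⟨by omega, by omega⟩ :
              0 < s - (s - run - 1) - 1 ∧ s - (s - run - 1) - 1 < m)]
            rw [Bool.true_or, if_pos hc]
          · rw [decide_eq_false (fun hx => hc ⟨by omega, by omega⟩ :
              ¬(0 < s - (s - run - 1) - 1 ∧ s - (s - run - 1) - 1 < m))]
            rw [Bool.false_or, if_neg hc]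
      | false =>
          simp only [lhsrBlk, lhsrGo, List.length_cons]
          push_cast
          have h1 : s - run - 1 = (s + 1) - (run + 1) - 1 := by ring
          have h2 : s + (↑rest.length + 1) = (s + 1) + ↑rest.length := by ring
          rw [h1, h2, ih (s + 1) (run + 1) (by omega)]

-- ===== VERDICT (by name: the statement is the Claim_ definition above) =====
theorem line_has_short_run_py_spec : Claim_equal_line_has_short_run_py := by
  intro line min_len _
  unfold Spec_line_has_short_run_py line_has_short_run_py line_has_short_run_py_alt
  have hB := zip_any_eq_lhsrGaps (lhsrBlk 0 line) (-1) (line.length : Int) min_len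
  have hA := lhsrGaps_eq_go line 0 0 min_len le_rfl
  simp only [lhsrBlk_eq_filterMap]
  simp only [List.singleton_append] at hB ⊢
  rw [hB]
  have : (-1 : Int) = 0 - 0 - 1 := by ring
  rw [this]
  have : (line.length : Int) = 0 + line.length := by ring
  rw [this, hA]
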